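-- pv_equiv track=rewrite | github.com/dod-advana/gamechanger-data | gamechangerml/src/text_classif/utils/classifier_utils.py | next_pow_two
-- ===== SOURCE A (Python) =====
-- def next_pow_two(max_sent_tokens):
--     """
--     Next power of two for a given input, with a minimum of 16 and a
--     maximum of 512
--
--     Args:
--         max_sent_tokens (int): the integer
--
--     Returns:
--         int: the appropriate power of two
--     """
--     pow_two = [16, 32, 64, 128, 256, 512]
--     if max_sent_tokens <= pow_two[0]:
--         return pow_two[0]
--     if max_sent_tokens >= pow_two[-1]:
--         return pow_two[-1]
--     check = [max_sent_tokens > j for j in pow_two]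
--     idx = check.index(False)
--     return pow_two[idx]
-- ===== SOURCE B (Python) =====
-- def next_pow_two(max_sent_tokens):
--     p = 16
--     while p < max_sent_tokens and p < 512:
--         p *= 2
--     return p
-- ===== Notes on version B (the rewrite author's own statement) =====
-- stated objective: simpler
-- what changed: Replaces the fixed power-of-two list, boolean comparison list and .index(False) scan with an iterative-doubling loop that keeps only the running power, clamped by the loop guard.
import Mathlib
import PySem

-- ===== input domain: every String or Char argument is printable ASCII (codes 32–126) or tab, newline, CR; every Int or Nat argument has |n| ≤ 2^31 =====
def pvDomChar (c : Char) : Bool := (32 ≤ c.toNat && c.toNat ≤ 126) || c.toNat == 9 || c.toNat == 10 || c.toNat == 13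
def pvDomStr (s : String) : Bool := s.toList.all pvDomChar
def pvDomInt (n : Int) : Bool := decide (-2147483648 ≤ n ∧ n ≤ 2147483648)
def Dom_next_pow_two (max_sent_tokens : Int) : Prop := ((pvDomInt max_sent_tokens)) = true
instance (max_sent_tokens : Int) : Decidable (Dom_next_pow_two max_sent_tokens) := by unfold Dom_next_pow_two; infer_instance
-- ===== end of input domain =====

-- ===== PORT A =====
-- B replaces A's fixed list + boolean-list .index(False) scan with an iterative-doubling loop (simpler; same O(1) cost).
-- Port of A: the list, the two guard returns, the comparison list, and index(False).
-- In the final branch 16 < m < 512, so False is always present (index? = some) and the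
-- index is in range; the .getD fallbacks are unreachable (Python never raises here).
def next_pow_two (max_sent_tokens : Int) : Int :=
  let pow_two : List Int := [16, 32, 64, 128, 256, 512]
  if max_sent_tokens ≤ 16 then 16
  else if max_sent_tokens ≥ 512 then 512
  else
    let check : List Bool := pow_two.map (fun j => decide (max_sent_tokens > j))
    match PySem.List.index? check false with
    | some idx => (PySem.List.pyGet? pow_two (Int.ofNat idx)).getD 0
    | none => 0

-- ===== PORT B =====
-- while p < max_sent_tokens and p < 512: p *= 2   (fuel 6 > the at-most-5 iterations)
def nptLoop (fuel : Nat) (m p : Int) : Int :=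
  match fuel with
  | 0 => p
  | n + 1 => if p < m ∧ p < 512 then nptLoop n m (2 * p) else p

def next_pow_two_alt (max_sent_tokens : Int) : Int :=
  nptLoop 6 max_sent_tokens 16

-- ===== PRECONDITION & SPEC =====
def Spec_next_pow_two (max_sent_tokens : Int) (out : Int) : Prop := out = next_pow_two_alt max_sent_tokens
instance (max_sent_tokens : Int) (out : Int) : Decidable (Spec_next_pow_two max_sent_tokens out) := by unfold Spec_next_pow_two; infer_instance

-- ===== CLAIM (what is proved, stated in full; the proofs are below) =====
def Claim_equal_next_pow_two : Prop := ∀ (max_sent_tokens : Int), Dom_next_pow_two max_sent_tokens → Spec_next_pow_two max_sent_tokens (next_pow_two max_sent_tokens)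

-- ===== LEMMAS AND PROOFS =====

-- ===== VERDICT (by name: the statement is the Claim_ definition above) =====
-- per-interval branch: with lo < m ≤ hi fixed, both ports evaluate to the same literal
theorem npt_case (m : Int) (h16 : ¬ m ≤ 16) (h512 : ¬ m ≥ 512) :
    next_pow_two m = next_pow_two_alt m := by
  unfold next_pow_two next_pow_two_alt
  rw [if_neg h16, if_neg h512]
  by_cases h : m ≤ 32
  · simp only [gt_iff_lt, List.map_cons, List.map_nil,
      decide_eq_true (show (16:Int) < m by omega),
      decide_eq_false (show ¬ (32:Int) < m by omega),
      decide_eq_false (show ¬ (64:Int) < m by omega),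
      decide_eq_false (show ¬ (128:Int) < m by omega),
      decide_eq_false (show ¬ (256:Int) < m by omega),
      decide_eq_false (show ¬ (512:Int) < m by omega)]
    norm_num [nptLoop, show (16:Int) < m by omega, show ¬ (32:Int) < m by omega]
    decide
  · by_cases h : m ≤ 64
    · simp only [gt_iff_lt, List.map_cons, List.map_nil,
        decide_eq_true (show (16:Int) < m by omega),
        decide_eq_true (show (32:Int) < m by omega),
        decide_eq_false (show ¬ (64:Int) < m by omega),
        decide_eq_false (show ¬ (128:Int) < m by omega),
        decide_eq_false (show ¬ (256:Int) < m by omega),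
        decide_eq_false (show ¬ (512:Int) < m by omega)]
      norm_num [nptLoop, show (16:Int) < m by omega, show (32:Int) < m by omega,
        show ¬ (64:Int) < m by omega]
      decide
    · by_cases h : m ≤ 128
      · simp only [gt_iff_lt, List.map_cons, List.map_nil,
          decide_eq_true (show (16:Int) < m by omega),
          decide_eq_true (show (32:Int) < m by omega),
          decide_eq_true (show (64:Int) < m by omega),
          decide_eq_false (show ¬ (128:Int) < m by omega),
          decide_eq_false (show ¬ (256:Int) < m by omega),
          decide_eq_false (show ¬ (512:Int) < m by omega)]
        norm_num [nptLoop, show (16:Int) < m by omega, show (32:Int) < m by omega,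
          show (64:Int) < m by omega, show ¬ (128:Int) < m by omega]
        decide
      · by_cases h : m ≤ 256
        · simp only [gt_iff_lt, List.map_cons, List.map_nil,
            decide_eq_true (show (16:Int) < m by omega),
            decide_eq_true (show (32:Int) < m by omega),
            decide_eq_true (show (64:Int) < m by omega),
            decide_eq_true (show (128:Int) < m by omega),
            decide_eq_false (show ¬ (256:Int) < m by omega),
            decide_eq_false (show ¬ (512:Int) < m by omega)]
          norm_num [nptLoop, show (16:Int) < m by omega, show (32:Int) < m by omega,
            show (64:Int) < m by omega, show (128:Int) < m by omega,
            show ¬ (256:Int) < m by omega]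
          decide
        · simp only [gt_iff_lt, List.map_cons, List.map_nil,
            decide_eq_true (show (16:Int) < m by omega),
            decide_eq_true (show (32:Int) < m by omega),
            decide_eq_true (show (64:Int) < m by omega),
            decide_eq_true (show (128:Int) < m by omega),
            decide_eq_true (show (256:Int) < m by omega),
            decide_eq_false (show ¬ (512:Int) < m by omega)]
          norm_num [nptLoop, show (16:Int) < m by omega, show (32:Int) < m by omega,
            show (64:Int) < m by omega, show (128:Int) < m by omega,
            show (256:Int) < m by omega, show ¬ (512:Int) < m by omega]
          decide

theorem next_pow_two_spec : Claim_equal_next_pow_two := by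
  intro m _
  unfold Spec_next_pow_two
  by_cases h16 : m ≤ 16
  · unfold next_pow_two next_pow_two_alt
    rw [if_pos h16]
    norm_num [nptLoop, show ¬ (16:Int) < m by omega]
  · by_cases h512 : m ≥ 512
    · unfold next_pow_two next_pow_two_alt
      rw [if_neg h16, if_pos h512]
      norm_num [nptLoop, show (16:Int) < m by omega, show (32:Int) < m by omega,
        show (64:Int) < m by omega, show (128:Int) < m by omega,
        show (256:Int) < m by omega]
    · exact npt_case m h16 h512
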